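-- pv_equiv track=rewrite | github.com/ymcidence/AssignmentZuma | tools.py | get_elimination_length
-- ===== SOURCE A (Python) =====
-- def get_elimination_length(seq: list):
--     """
--     Finds the maximum number of connected mono-colour balls.
--
--     HOWTO: This is done by popping out already-read elements and counting upon colour change
--
--     :param seq: a list of numbers indicating different colours of balls
--     :return: the length
--     """
--     current_colour = seq[0]
--     current_length = 0
--
--     while seq[-1] == current_colour:
--         current_length += 1
--         seq.pop()
--     max_length = current_length
--
--     while seq.__len__() > 1:
--         current_length += 1
--
--         if max_length <= current_length:
--             max_length = current_length
--
--         if seq[0] != seq[1]: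
--             current_length = 0
--             current_colour = seq[1]
--
--         seq.pop(0)
--
--     if current_colour == seq[0] and max_length == current_length:
--         max_length += 1
--
--     return max_length
-- ===== SOURCE B (Python) =====
-- def get_elimination_length(seq):
--     # Single linear pass: collect run lengths, then merge first/last run
--     # for the circular wrap. Does not mutate seq (A empties it in place).
--     first = seq[0]
--     runs = []
--     cur = 1
--     prev = first
--     for x in seq[1:]:
--         if x == prev:
--             cur += 1
--         else:
--             runs.append(cur)
--             cur = 1
--         prev = x
--     runs.append(cur)
--     best = max(runs)
--     if len(runs) > 1 and prev == first:
--         best = max(best, runs[0] + runs[-1])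
--     return best
-- ===== Notes on version B (the rewrite author's own statement) =====
-- stated objective: faster
-- what changed: A repeatedly pops elements from the front of the list (O(n) per pop in CPython) while threading counter state through two while-loops; B makes one linear pass collecting run lengths and merges the first and last run when the list wraps around with the same colour.
import Mathlib
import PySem

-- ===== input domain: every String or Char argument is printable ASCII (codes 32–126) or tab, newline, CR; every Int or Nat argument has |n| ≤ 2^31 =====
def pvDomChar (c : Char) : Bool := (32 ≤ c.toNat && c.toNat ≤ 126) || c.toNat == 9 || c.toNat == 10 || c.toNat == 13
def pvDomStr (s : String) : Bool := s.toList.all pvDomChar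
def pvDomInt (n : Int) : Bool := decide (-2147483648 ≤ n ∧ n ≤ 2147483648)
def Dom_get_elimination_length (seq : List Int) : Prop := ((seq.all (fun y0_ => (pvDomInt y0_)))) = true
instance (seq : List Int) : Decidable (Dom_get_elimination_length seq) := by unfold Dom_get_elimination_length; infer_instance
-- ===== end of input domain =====

-- B replaces A's quadratic pop-from-front scan by one linear pass over run lengths,
-- merging the first and last run for the circular wrap; equivalence is about the
-- RETURN value only: A empties `seq` in place, B does not mutate it.

-- ===== PORT A =====
-- `while seq[-1] == current_colour: current_length += 1; seq.pop()`, run on the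
-- reversed list so that popping from the end is popping the head.
def pvPopEnd (c : Int) : List Int → List Int × Int
  | [] => ([], 0)          -- Python raises IndexError at seq[-1] here (outside Pre_)
  | x :: xs =>
      if x = c then
        let p := pvPopEnd c xs
        (p.1, p.2 + 1)
      else (x :: xs, 0)

-- the `while seq.__len__() > 1` loop plus the final fix-up `if` of A
def pvPhase2 : List Int → Int → Int → Int → Int
  | x :: y :: rest, colour, cur, mx =>
      let cur' := cur + 1
      let mx' := if mx ≤ cur' then cur' else mx
      if x ≠ y then pvPhase2 (y :: rest) y 0 mx'
      else pvPhase2 (y :: rest) colour cur' mx'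
  | [x], colour, cur, mx => if colour = x ∧ mx = cur then mx + 1 else mx
  | [], _, _, mx => mx     -- Python raises IndexError at the final seq[0] (outside Pre_)

def get_elimination_length (seq : List Int) : Int :=
  let c := seq.headD 0                 -- seq[0]; IndexError on [] (outside Pre_)
  let p := pvPopEnd c seq.reverse
  pvPhase2 p.1.reverse c p.2 p.2

-- ===== PORT B =====
-- the `for x in seq[1:]` loop of Source B: prev, running run length `cur`, emitted runs
def pvBuildRuns : Int → List Int → Int → List Int
  | _, [], cur => [cur]
  | prev, x :: xs, cur =>
      if x = prev then pvBuildRuns x xs (cur + 1) else cur :: pvBuildRuns x xs 1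

def get_elimination_length_alt (seq : List Int) : Int :=
  let first := seq.headD 0             -- seq[0]; IndexError on [] (outside Pre_)
  let runs := pvBuildRuns first seq.tail 1
  let best := (PySem.List.max? runs (fun y => y)).getD 0   -- max(runs); runs ≠ []
  let prev := seq.getLastD first       -- value of `prev` after the loop
  if runs.length > 1 ∧ prev = first then
    max best (runs.headD 0 + runs.getLastD 0)
  else best

-- ===== PRECONDITION & SPEC =====
-- Pre_ excludes exactly the inputs where A raises IndexError: the empty list and
-- nonempty uniform lists (A's first while-loop empties them, then seq[-1] raises).
def Pre_get_elimination_length (seq : List Int) : Prop :=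
  ∃ x ∈ seq, x ≠ seq.headD 0
instance (seq : List Int) : Decidable (Pre_get_elimination_length seq) := by
  unfold Pre_get_elimination_length; infer_instance

def pvWitness_get_elimination_length : List Int := [1, 2]

def Spec_get_elimination_length (seq : List Int) (out : Int) : Prop :=
  out = get_elimination_length_alt seq
instance (seq : List Int) (out : Int) : Decidable (Spec_get_elimination_length seq out) := by
  unfold Spec_get_elimination_length; infer_instance

-- ===== CLAIM (what is proved, stated in full; the proofs are below) =====
def Claim_equal_get_elimination_length : Prop :=
  ∀ (seq : List Int), Dom_get_elimination_length seq →
    Pre_get_elimination_length seq →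
    Spec_get_elimination_length seq (get_elimination_length seq)

-- ===== LEMMAS AND PROOFS =====

-- max of a nonempty list as Python's max computes it
def pvLMax : List Int → Int
  | [] => 0
  | h :: t => t.foldl max h

theorem pvPopEnd_eval (c a : Int) (as : List Int) (ha : a ≠ c) : ∀ (k : ℕ),
    pvPopEnd c (List.replicate k c ++ a :: as) = (a :: as, (k : Int)) := by
  intro k
  induction k with
  | zero => simp [pvPopEnd, ha]
  | succ n ih => simp [List.replicate_succ, pvPopEnd, ih]

-- pvBuildRuns: nonempty, head carries the start offset, tail independent of it
theorem pvBuildRuns_offset (u : List Int) :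
    ∀ (p a b : Int), ∃ h t', pvBuildRuns p u a = (h + a) :: t' ∧
      pvBuildRuns p u b = (h + b) :: t' ∧ 0 ≤ h := by
  induction u with
  | nil => intro p a b; exact ⟨0, [], by simp [pvBuildRuns], by simp [pvBuildRuns], le_refl 0⟩
  | cons x xs ih =>
      intro p a b
      by_cases hx : x = p
      · subst hx
        obtain ⟨h, t', h1, h2, h0⟩ := ih x (a + 1) (b + 1)
        refine ⟨h + 1, t', ?_, ?_, by omega⟩
        · show pvBuildRuns x (x :: xs) a = (h + 1 + a) :: t'
          rw [show pvBuildRuns x (x :: xs) a = pvBuildRuns x xs (a + 1) from by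
                simp [pvBuildRuns], h1, show h + (a + 1) = h + 1 + a by ring]
        · show pvBuildRuns x (x :: xs) b = (h + 1 + b) :: t'
          rw [show pvBuildRuns x (x :: xs) b = pvBuildRuns x xs (b + 1) from by
                simp [pvBuildRuns], h2, show h + (b + 1) = h + 1 + b by ring]
      · exact ⟨0, pvBuildRuns x xs 1, by simp [pvBuildRuns, hx], by simp [pvBuildRuns, hx], le_refl 0⟩

theorem pvLMax_lb (u : List Int) (p cur : Int) : cur ≤ pvLMax (pvBuildRuns p u cur) := by
  obtain ⟨h, t', h1, -, h0⟩ := pvBuildRuns_offset u p cur cur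
  rw [h1]
  have := (PySem.List.le_foldl_max t' (h + cur)).1
  simp only [pvLMax]; omega

-- pulling the base of foldl max apart
theorem foldl_max_max (t : List Int) : ∀ (a b : Int),
    t.foldl max (max a b) = max a (t.foldl max b) := by
  induction t with
  | nil => intro a b; rfl
  | cons x xs ih =>
      intro a b
      simp only [List.foldl_cons]
      rw [max_assoc, ih]

-- phase 2 computes max(mx, max of the runs of (x::u), first run started at cur+1)
theorem pvPhase2_runs (u : List Int) : ∀ (x cur mx : Int), 0 ≤ cur → cur ≤ mx →
    pvPhase2 (x :: u) x cur mx = max mx (pvLMax (pvBuildRuns x u (cur + 1))) := by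
  induction u with
  | nil =>
      intro x cur mx h0 hle
      simp only [pvPhase2, pvBuildRuns, pvLMax, List.foldl_nil,
        true_and, max_def]
      split_ifs <;> omega
  | cons y ys ih =>
      intro x cur mx h0 hle
      by_cases hxy : x = y
      · subst hxy
        have hstep : pvPhase2 (x :: x :: ys) x cur mx =
            pvPhase2 (x :: ys) x (cur + 1) (if mx ≤ cur + 1 then cur + 1 else mx) := by
          simp [pvPhase2]
        rw [hstep, ih x (cur + 1) (if mx ≤ cur + 1 then cur + 1 else mx)
              (by omega) (by split_ifs <;> omega)]
        have hruns : pvBuildRuns x (x :: ys) (cur + 1) = pvBuildRuns x ys (cur + 1 + 1) := by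
          simp [pvBuildRuns]
        rw [hruns]
        have hlb := pvLMax_lb ys x (cur + 1 + 1)
        simp only [max_def]
        split_ifs <;> omega
      · have hstep : pvPhase2 (x :: y :: ys) x cur mx =
            pvPhase2 (y :: ys) y 0 (if mx ≤ cur + 1 then cur + 1 else mx) := by
          simp [pvPhase2, hxy]
        rw [hstep, ih y 0 (if mx ≤ cur + 1 then cur + 1 else mx)
              (le_refl 0) (by split_ifs <;> omega)]
        have hruns : pvBuildRuns x (y :: ys) (cur + 1) =
            (cur + 1) :: pvBuildRuns y ys 1 := by
          simp only [pvBuildRuns]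
          rw [if_neg (fun h => hxy h.symm)]
        rw [hruns]
        obtain ⟨h, t', h1, -, h0'⟩ := pvBuildRuns_offset ys y 1 1
        rw [show (0 : Int) + 1 = 1 from rfl, h1]
        simp only [pvLMax, List.foldl_cons]
        rw [show max (cur + 1) (h + 1) = max (cur + 1) (h + 1) from rfl,
            foldl_max_max t' (cur + 1) (h + 1)]
        have hlb := (PySem.List.le_foldl_max t' (h + 1)).1
        simp only [max_def]
        split_ifs <;> omega

-- runs across a colour boundary split as an append
theorem pvBuildRuns_append (c : Int) (cs : List Int) : ∀ (u : List Int) (p cur : Int),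
    u.getLastD p ≠ c →
    pvBuildRuns p (u ++ c :: cs) cur = pvBuildRuns p u cur ++ pvBuildRuns c cs 1 := by
  intro u
  induction u with
  | nil =>
      intro p cur hp
      simp only [List.getLastD_nil] at hp
      simp [pvBuildRuns, Ne.symm hp]
  | cons y ys ih =>
      intro p cur hp
      simp only [List.getLastD_cons] at hp
      by_cases hy : y = p
      · subst hy
        simp [pvBuildRuns, ih y (cur + 1) hp]
      · simp [pvBuildRuns, hy, ih y 1 hp]

theorem pvBuildRuns_replicate (c : Int) (j : ℕ) : ∀ (m : Int),
    pvBuildRuns c (List.replicate j c) m = [m + j] := by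
  induction j with
  | zero => intro m; simp [pvBuildRuns]
  | succ n ih => intro m; simp [List.replicate_succ, pvBuildRuns, ih]; ring

theorem getLastD_concat' (y d : Int) (l : List Int) : (l ++ [y]).getLastD d = y := by
  simp [List.getLastD_eq_getLast?]

theorem getLastD_append_cons (l : List Int) (c : Int) (cs : List Int) (d : Int) :
    (l ++ c :: cs).getLastD d = (c :: cs).getLastD d := by
  obtain ⟨v, hv⟩ := Option.isSome_iff_exists.mp
    (List.getLast?_isSome.mpr (by simp : (c :: cs) ≠ []))
  simp [List.getLastD_eq_getLast?, List.getLast?_append, hv]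

theorem getLastD_replicate (c d : Int) (j : ℕ) : (c :: List.replicate j c).getLastD d = c := by
  induction j with
  | zero => rfl
  | succ n ih => simpa [List.replicate_succ, List.getLastD_cons] using ih

-- the main equivalence on the decomposed input: seq = c :: ys ++ [y] ++ replicate k c
theorem main_case (c y : Int) (ys : List Int) (k : ℕ) (hy : y ≠ c) :
    get_elimination_length (c :: (ys ++ [y]) ++ List.replicate k c) =
    get_elimination_length_alt (c :: (ys ++ [y]) ++ List.replicate k c) := by
  have hlast : (ys ++ [y]).getLastD c ≠ c := by rw [getLastD_concat']; exact hy
  -- A's side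
  have hrev : (c :: (ys ++ [y]) ++ List.replicate k c).reverse
      = List.replicate k c ++ (y :: (ys.reverse ++ [c])) := by
    simp [List.reverse_append, List.reverse_replicate]
  have hA : get_elimination_length (c :: (ys ++ [y]) ++ List.replicate k c)
      = pvPhase2 (c :: (ys ++ [y])) c k k := by
    show pvPhase2 _ _ _ _ = _
    rw [show (c :: (ys ++ [y]) ++ List.replicate k c).headD 0 = c from rfl,
        hrev, pvPopEnd_eval c y (ys.reverse ++ [c]) hy k]
    simp [List.reverse_append]
  rw [hA, pvPhase2_runs (ys ++ [y]) c k k (Int.natCast_nonneg k) (le_refl _)]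
  -- B's side: shared run decomposition
  obtain ⟨h, t', h1, h2, h0⟩ := pvBuildRuns_offset (ys ++ [y]) c 1 ((k : Int) + 1)
  have hF := (PySem.List.le_foldl_max t' (h + 1)).1
  show _ = get_elimination_length_alt _
  simp only [get_elimination_length_alt]
  rw [show (c :: (ys ++ [y]) ++ List.replicate k c).headD 0 = c from rfl,
      show (c :: (ys ++ [y]) ++ List.replicate k c).tail = (ys ++ [y]) ++ List.replicate k c from rfl]
  cases k with
  | zero =>
      simp only [List.replicate_zero, List.append_nil, Nat.cast_zero] at h2 ⊢
      rw [h1]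
      have hprev : (c :: (ys ++ [y])).getLastD c = y := by
        rw [show c :: (ys ++ [y]) = (c :: ys) ++ [y] from rfl, getLastD_concat']
      rw [hprev, if_neg (by simp [hy])]
      rw [PySem.List.max?_id_cons]
      simp only [Option.getD_some, pvLMax]
      rw [show (0 : Int) + 1 = 1 from rfl, h1] at h2 ⊢
      simp only [max_def]
      split_ifs <;> omega
  | succ j =>
      have hsplit : pvBuildRuns c ((ys ++ [y]) ++ List.replicate (j + 1) c) 1
          = ((h + 1) :: t') ++ [1 + (j : Int)] := by
        rw [List.replicate_succ,
            pvBuildRuns_append c (List.replicate j c) (ys ++ [y]) c 1 hlast,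
            pvBuildRuns_replicate c j 1, h1]
      rw [hsplit]
      have hprev : (c :: (ys ++ [y]) ++ List.replicate (j + 1) c).getLastD c = c := by
        rw [show c :: (ys ++ [y]) ++ List.replicate (j + 1) c
              = (c :: ys ++ [y]) ++ (c :: List.replicate j c) from by rw [List.replicate_succ]; simp,
            getLastD_append_cons, getLastD_replicate]
      rw [hprev, if_pos (by simp)]
      rw [show ((h + 1) :: t') ++ [1 + (j : Int)] = (h + 1) :: (t' ++ [1 + (j : Int)]) from rfl,
          PySem.List.max?_id_cons]
      simp only [Option.getD_some, List.foldl_append, List.foldl_cons, List.foldl_nil]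
      rw [h2]
      simp only [pvLMax, List.headD_cons]
      rw [show (h + 1) :: (t' ++ [1 + (j : Int)]) = ((h + 1) :: t') ++ [1 + (j : Int)] from rfl,
          getLastD_concat']
      rw [show h + (((j : ℕ) + 1 : ℕ) + 1 : Int) = max (h + (((j : ℕ) + 1 : ℕ) + 1 : Int)) (h + 1) from
            (max_eq_left (by push_cast; omega)).symm,
          foldl_max_max t' (h + (((j : ℕ) + 1 : ℕ) + 1 : Int)) (h + 1)]
      push_cast
      simp only [max_def]
      split_ifs <;> omega

-- every list is uniform or splits off its maximal constant-c suffix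
theorem split_tail (c : Int) (s : List Int) :
    (∀ x ∈ s, x = c) ∨ ∃ ys y k, y ≠ c ∧ s = ys ++ [y] ++ List.replicate k c := by
  induction s using List.reverseRecOn with
  | nil => exact Or.inl (by simp)
  | append_singleton s a ih =>
      by_cases ha : a = c
      · subst ha
        rcases ih with hall | ⟨ys, y, k, hy, hs⟩
        · left; intro x hx
          rcases List.mem_append.1 hx with h | h
          · exact hall x h
          · simpa using h
        · right
          exact ⟨ys, y, k + 1, hy, by rw [hs, List.replicate_succ']; simp⟩
      · right; exact ⟨s, a, 0, ha, by simp⟩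

-- ===== VERDICT (by name: the statement is the Claim_ definition above) =====
theorem get_elimination_length_spec : Claim_equal_get_elimination_length := by
  intro seq _ hpre
  obtain ⟨x, hx, hxne⟩ := hpre
  match seq, hx with
  | c :: s, hx =>
      show get_elimination_length (c :: s) = get_elimination_length_alt (c :: s)
      rcases split_tail c s with hall | ⟨ys, y, k, hy, hs⟩
      · exfalso
        apply hxne
        rcases List.mem_cons.1 hx with h | h
        · simpa using h
        · simpa using hall x h
      · rw [hs, show c :: (ys ++ [y] ++ List.replicate k c)
              = c :: (ys ++ [y]) ++ List.replicate k c from by simp]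
        exact main_case c y ys k hy
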